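-- pv_equiv track=rewrite | github.com/pypi-data/pypi-mirror-379 | packages/mockylla/mockylla-0.5.0-py3-none-any.whl/mockylla/parser/select.py | __compute_select_flags
-- ===== SOURCE A (Python) =====
-- def __compute_select_flags(select_items):
--     """Collect common boolean flags from parsed SELECT items."""
--     return {
--         "has_aggregates": any(
--             item["type"] == "aggregate" for item in select_items
--         ),
--         "has_columns": any(item["type"] == "column" for item in select_items),
--         "has_wildcard": any(
--             item["type"] == "wildcard" for item in select_items
--         ),
--         "has_functions": any(
--             item["type"] == "function" for item in select_items
--         ),
--     }
-- ===== SOURCE B (Python) =====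
-- def __compute_select_flags(select_items):
--     """Collect common boolean flags from parsed SELECT items."""
--     agg = col = wild = func = False
--     for item in select_items:
--         t = item["type"]
--         agg = agg or t == "aggregate"
--         col = col or t == "column"
--         wild = wild or t == "wildcard"
--         func = func or t == "function"
--         if agg and col and wild and func:
--             break
--     return {
--         "has_aggregates": agg,
--         "has_columns": col,
--         "has_wildcard": wild,
--         "has_functions": func,
--     }
-- ===== Notes on version B (the rewrite author's own statement) =====
-- stated objective: alternative
-- what changed: B makes a single pass over the items accumulating all four type flags at once (with early exit when all are set), instead of A's four separate short-circuiting any-scans of the list.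
import Mathlib
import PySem

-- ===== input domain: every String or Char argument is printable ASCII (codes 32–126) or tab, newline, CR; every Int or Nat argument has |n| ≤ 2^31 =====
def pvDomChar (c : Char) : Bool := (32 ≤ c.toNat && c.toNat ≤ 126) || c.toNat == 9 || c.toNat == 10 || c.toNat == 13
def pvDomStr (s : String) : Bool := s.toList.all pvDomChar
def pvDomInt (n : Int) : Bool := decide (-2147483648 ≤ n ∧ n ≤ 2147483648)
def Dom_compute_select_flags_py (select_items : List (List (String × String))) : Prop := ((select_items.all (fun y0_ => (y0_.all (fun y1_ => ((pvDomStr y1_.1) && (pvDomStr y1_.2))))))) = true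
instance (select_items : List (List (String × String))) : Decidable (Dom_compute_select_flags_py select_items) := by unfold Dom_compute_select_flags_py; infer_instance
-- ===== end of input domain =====

-- B replaces A's four separate short-circuiting any-scans by one pass accumulating all four flags (early exit once all are set); objective: alternative.

-- ===== PORT A =====
-- A: four independent any(...) scans, each comparing item["type"] to one literal.
def compute_select_flags_py (select_items : List (List (String × String))) : List (String × Bool) :=
  [("has_aggregates", select_items.any (fun item => (PySem.Dict.mk item).get? "type" == some "aggregate")),
   ("has_columns",    select_items.any (fun item => (PySem.Dict.mk item).get? "type" == some "column")),
   ("has_wildcard",   select_items.any (fun item => (PySem.Dict.mk item).get? "type" == some "wildcard")),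
   ("has_functions",  select_items.any (fun item => (PySem.Dict.mk item).get? "type" == some "function"))]

-- ===== PORT B =====
-- B: one loop over the items updating four Boolean accumulators, breaking once all four are true.
-- item["type"] is ported as getD "type" "" — inside Pre_ the loop never reads a missing key
-- before breaking, so the "" default is never the value Python would have raised on.
def pvBLoop (l : List (List (String × String))) (agg col wild func : Bool) :
    Bool × Bool × Bool × Bool :=
  match l with
  | [] => (agg, col, wild, func)
  | item :: rest =>
    let t := (PySem.Dict.mk item).getD "type" ""
    let agg := agg || t == "aggregate"
    let col := col || t == "column"
    let wild := wild || t == "wildcard"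
    let func := func || t == "function"
    if agg && col && wild && func then (agg, col, wild, func)
    else pvBLoop rest agg col wild func

def compute_select_flags_py_alt (select_items : List (List (String × String))) : List (String × Bool) :=
  let r := pvBLoop select_items false false false false
  [("has_aggregates", r.1), ("has_columns", r.2.1),
   ("has_wildcard", r.2.2.1), ("has_functions", r.2.2.2)]

-- ===== PRECONDITION & SPEC =====
-- Pre_ excludes exactly the inputs where Python A raises KeyError: some item lacks the key
-- "type" and the keyed prefix before the first such item does not already contain all four
-- types (there B's Python raises KeyError at the same item; where the prefix has all four
-- types both programs return the all-True dict and those inputs stay inside Pre_).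
def Pre_compute_select_flags_py (select_items : List (List (String × String))) : Prop :=
  (select_items.all (fun item => (PySem.Dict.mk item).contains "type")) = true ∨
  (let p := select_items.takeWhile (fun item => (PySem.Dict.mk item).contains "type")
   (p.any (fun item => (PySem.Dict.mk item).get? "type" == some "aggregate")) = true ∧
   (p.any (fun item => (PySem.Dict.mk item).get? "type" == some "column")) = true ∧
   (p.any (fun item => (PySem.Dict.mk item).get? "type" == some "wildcard")) = true ∧
   (p.any (fun item => (PySem.Dict.mk item).get? "type" == some "function")) = true)
instance (select_items : List (List (String × String))) : Decidable (Pre_compute_select_flags_py select_items) := by unfold Pre_compute_select_flags_py; infer_instance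
def pvWitness_compute_select_flags_py : (List (List (String × String))) := [[("type", "column")], [("type", "aggregate")]]
def Spec_compute_select_flags_py (select_items : List (List (String × String))) (out : List (String × Bool)) : Prop := out = compute_select_flags_py_alt select_items
instance (select_items : List (List (String × String))) (out : List (String × Bool)) : Decidable (Spec_compute_select_flags_py select_items out) := by unfold Spec_compute_select_flags_py; infer_instance

-- ===== CLAIM (what is proved, stated in full; the proofs are below) =====
def Claim_equal_compute_select_flags_py : Prop := ∀ (select_items : List (List (String × String))), Dom_compute_select_flags_py select_items → Pre_compute_select_flags_py select_items → Spec_compute_select_flags_py select_items (compute_select_flags_py select_items)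

-- ===== LEMMAS AND PROOFS =====
-- Per-item: the getD-"" test used by B's loop agrees with A's get?-based test for each of the
-- four (nonempty) type names.
theorem pvTest_eq (item : List (String × String)) (v : String) (hv : v ≠ "") :
    (((PySem.Dict.mk item).getD "type" "") == v) =
      ((PySem.Dict.mk item).get? "type" == some v) := by
  rw [PySem.Dict.getD_eq_get?_getD]
  cases h : (PySem.Dict.mk item).get? "type" with
  | none => simp [Option.getD, (by simpa [eq_comm] using hv : ¬ ("" = v))]
  | some t => simp [Option.getD]

-- The loop computes, for each slot, the accumulator OR-ed with the corresponding any-scan.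
theorem pvBLoop_eq (l : List (List (String × String))) (a c w f : Bool) :
    pvBLoop l a c w f =
      (a || l.any (fun item => (PySem.Dict.mk item).get? "type" == some "aggregate"),
       c || l.any (fun item => (PySem.Dict.mk item).get? "type" == some "column"),
       w || l.any (fun item => (PySem.Dict.mk item).get? "type" == some "wildcard"),
       f || l.any (fun item => (PySem.Dict.mk item).get? "type" == some "function")) := by
  induction l generalizing a c w f with
  | nil => simp [pvBLoop]
  | cons item rest ih =>
    simp only [pvBLoop, pvTest_eq _ "aggregate" (by decide), pvTest_eq _ "column" (by decide),
      pvTest_eq _ "wildcard" (by decide), pvTest_eq _ "function" (by decide), List.any_cons]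
    split
    · rename_i h
      simp only [Bool.and_eq_true] at h
      obtain ⟨⟨⟨h1, h2⟩, h3⟩, h4⟩ := h
      simp only [Bool.or_eq_true, beq_iff_eq] at h1 h2 h3 h4
      simp only [Prod.mk.injEq]
      exact ⟨by rcases h1 with h | h <;> simp [h], by rcases h2 with h | h <;> simp [h],
        by rcases h3 with h | h <;> simp [h], by rcases h4 with h | h <;> simp [h]⟩
    · rw [ih]
      simp [Bool.or_assoc]

-- ===== VERDICT (by name: the statement is the Claim_ definition above) =====
theorem compute_select_flags_py_spec : Claim_equal_compute_select_flags_py := by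
  intro select_items _ _
  unfold Spec_compute_select_flags_py compute_select_flags_py compute_select_flags_py_alt
  simp [pvBLoop_eq]
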